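-- pv_equiv track=rewrite | github.com/riceshowerX/astrbot_plugin_status | main.py | _escape_path
-- ===== SOURCE A (Python) =====
-- def _escape_path(path: str) -> str:
--     escape_chars = ['`', '*', '_', '{', '}', '[', ']', '(', ')', '#', '+', '-', '.', '!', '|']
--     for char in escape_chars:
--         path = path.replace(char, '')
--     path = path.replace('\n', ' ').replace('\r', ' ').strip()
--     if len(path) > 50:
--         path = path[:47] + '...'
--     return path
-- ===== SOURCE B (Python) =====
-- def _escape_path(path: str) -> str:
--     esc = set('`*_{}[]()#+-.!|')
--     out = ''.join(' ' if c in '\n\r' else c for c in path if c not in esc).strip()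
--     if len(out) > 50:
--         out = out[:47] + '...'
--     return out
-- ===== Notes on version B (the rewrite author's own statement) =====
-- stated objective: simpler
-- what changed: Replaces A's 17 sequential full-string replace() scans with a single filtering/mapping pass over the characters (one comprehension joined once), followed by the same strip and truncation.
import Mathlib
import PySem

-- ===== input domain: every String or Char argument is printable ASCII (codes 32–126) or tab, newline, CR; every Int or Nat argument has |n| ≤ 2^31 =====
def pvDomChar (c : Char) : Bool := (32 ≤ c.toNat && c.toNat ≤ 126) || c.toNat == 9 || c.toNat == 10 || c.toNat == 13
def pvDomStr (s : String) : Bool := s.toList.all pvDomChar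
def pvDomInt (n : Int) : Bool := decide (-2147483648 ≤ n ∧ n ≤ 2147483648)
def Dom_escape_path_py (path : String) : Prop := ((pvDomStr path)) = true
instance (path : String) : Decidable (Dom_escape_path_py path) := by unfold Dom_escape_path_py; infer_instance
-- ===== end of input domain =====

-- B replaces A's 17 sequential full-string replace() scans by one filtering/mapping pass over
-- the characters, then the same strip and >50 → [:47]+'...' truncation (simpler, one pass).

-- ===== PORT A =====
def escape_path_py (path : String) : String :=
  let escape_chars : List String := ["`", "*", "_", "{", "}", "[", "]", "(", ")", "#", "+", "-", ".", "!", "|"]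
  let path := escape_chars.foldl (fun p ch => PySem.Str.replace p ch "") path
  let path := PySem.Str.strip (PySem.Str.replace (PySem.Str.replace path "\n" " ") "\r" " ")
  if PySem.Str.len path > 50 then PySem.Str.slice path none (some 47) ++ "..." else path

-- ===== PORT B =====
def escape_path_py_alt (path : String) : String :=
  let esc : List Char := ['`', '*', '_', '{', '}', '[', ']', '(', ')', '#', '+', '-', '.', '!', '|']
  -- the comprehension "(' ' if c in '\n\r' else c for c in path if c not in esc)", joined once
  let out := (path.toList.filter (fun c => !(esc.contains c))).map
      (fun c => if c = '\n' || c = '\r' then ' ' else c)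
  let out := PySem.Chars.strip out
  if out.length > 50 then String.ofList (out.take 47 ++ ['.', '.', '.']) else String.ofList out

-- ===== PRECONDITION & SPEC =====
def Spec_escape_path_py (path : String) (out : String) : Prop := out = escape_path_py_alt path
instance (path : String) (out : String) : Decidable (Spec_escape_path_py path out) := by unfold Spec_escape_path_py; infer_instance

-- ===== CLAIM (what is proved, stated in full; the proofs are below) =====
def Claim_equal_escape_path_py : Prop := ∀ (path : String), Dom_escape_path_py path → Spec_escape_path_py path (escape_path_py path)

-- ===== LEMMAS AND PROOFS =====

-- replace.go with a single-char pattern is a flatMap over the characters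
lemma replace_go_single (c : Char) (new : List Char) :
    ∀ (fuel : Nat) (l acc : List Char), l.length ≤ fuel →
      PySem.Chars.replace.go [c] new fuel l acc
        = acc.reverse ++ l.flatMap (fun x => if x = c then new else [x]) := by
  intro fuel
  induction fuel with
  | zero =>
      intro l acc h
      have : l = [] := List.eq_nil_of_length_eq_zero (Nat.le_zero.mp h)
      subst this
      simp [PySem.Chars.replace.go]
  | succ n ih =>
      intro l acc h
      cases l with
      | nil => simp [PySem.Chars.replace.go]
      | cons x t =>
          by_cases hx : x = c
          · subst hx
            have hp : List.isPrefixOf [x] (x :: t) = true := by simp [List.isPrefixOf]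
            simp only [PySem.Chars.replace.go, hp, if_true]
            rw [ih _ _ (by simpa using Nat.le_of_succ_le_succ h)]
            simp
          · have hp : List.isPrefixOf [c] (x :: t) = false := by
              simp [List.isPrefixOf]; exact fun h' => absurd h'.symm hx
            simp only [PySem.Chars.replace.go, hp, Bool.false_eq_true, if_false]
            rw [ih _ _ (by simpa using Nat.le_of_succ_le_succ h)]
            simp [hx]

lemma replace_single (s : List Char) (c : Char) (new : List Char) :
    PySem.Chars.replace s [c] new = s.flatMap (fun x => if x = c then new else [x]) := by
  simpa using replace_go_single c new s.length s [] le_rfl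

lemma flatMap_if_nil (s : List Char) (c : Char) :
    s.flatMap (fun x => if x = c then ([] : List Char) else [x]) = s.filter (fun x => !(x == c)) := by
  induction s with
  | nil => rfl
  | cons y t ih => by_cases hy : y = c <;> simp [List.flatMap_cons, hy, ih]

lemma flatMap_if_space (s : List Char) (c : Char) :
    s.flatMap (fun x => if x = c then [' '] else [x]) = s.map (fun x => if x = c then ' ' else x) := by
  induction s with
  | nil => rfl
  | cons y t ih => by_cases hy : y = c <;> simp [List.flatMap_cons, hy, ih]

lemma string_ext (a b : String) (h : a.toList = b.toList) : a = b := by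
  have := congrArg String.ofList h
  simpa using this

lemma str_replace_lit (s ch new : String) (c : Char) (nl : List Char)
    (hch : ch.toList = [c]) (hnew : new.toList = nl) :
    PySem.Str.replace s ch new
      = String.ofList (s.toList.flatMap (fun x => if x = c then nl else [x])) := by
  simp [PySem.Str.replace, hch, hnew, replace_single]

lemma tail_step (r : List Char) :
    (if PySem.Str.len (String.ofList r) > 50
      then PySem.Str.slice (String.ofList r) none (some 47) ++ "..."
      else String.ofList r)
    = if r.length > 50 then String.ofList (r.take 47 ++ ['.', '.', '.']) else String.ofList r := by
  have hlen : PySem.Str.len (String.ofList r) = (r.length : Int) := by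
    simp [PySem.Str.len]
  by_cases h : 50 < r.length
  · have hc : PySem.Str.len (String.ofList r) > 50 := by rw [hlen]; exact_mod_cast h
    rw [if_pos hc, if_pos h]
    apply string_ext
    simp [String.toList_append, PySem.Str.slice, PySem.Chars.slice, PySem.List.slice_to]
  · have hc : ¬ PySem.Str.len (String.ofList r) > 50 := by rw [hlen]; exact_mod_cast h
    rw [if_neg hc, if_neg h]

-- ===== VERDICT (by name: the statement is the Claim_ definition above) =====
set_option maxHeartbeats 1000000 in
theorem escape_path_py_spec : Claim_equal_escape_path_py := by
  intro path _
  unfold Spec_escape_path_py escape_path_py escape_path_py_alt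
  simp only [List.foldl]
  rw [str_replace_lit _ "`" "" '`' [] (by decide) (by decide)]
  rw [str_replace_lit _ "*" "" '*' [] (by decide) (by decide)]
  rw [str_replace_lit _ "_" "" '_' [] (by decide) (by decide)]
  rw [str_replace_lit _ "{" "" '{' [] (by decide) (by decide)]
  rw [str_replace_lit _ "}" "" '}' [] (by decide) (by decide)]
  rw [str_replace_lit _ "[" "" '[' [] (by decide) (by decide)]
  rw [str_replace_lit _ "]" "" ']' [] (by decide) (by decide)]
  rw [str_replace_lit _ "(" "" '(' [] (by decide) (by decide)]
  rw [str_replace_lit _ ")" "" ')' [] (by decide) (by decide)]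
  rw [str_replace_lit _ "#" "" '#' [] (by decide) (by decide)]
  rw [str_replace_lit _ "+" "" '+' [] (by decide) (by decide)]
  rw [str_replace_lit _ "-" "" '-' [] (by decide) (by decide)]
  rw [str_replace_lit _ "." "" '.' [] (by decide) (by decide)]
  rw [str_replace_lit _ "!" "" '!' [] (by decide) (by decide)]
  rw [str_replace_lit _ "|" "" '|' [] (by decide) (by decide)]
  rw [str_replace_lit _ "\n" " " '\n' [' '] (by decide) (by decide)]
  rw [str_replace_lit _ "\r" " " '\r' [' '] (by decide) (by decide)]
  simp only [String.toList_ofList, flatMap_if_nil, flatMap_if_space, List.filter_filter,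
    List.map_map]
  have hf : (fun a => !a == '|' &&
        (!a == '!' && (!a == '.' && (!a == '-' && (!a == '+' && (!a == '#' && (!a == ')' &&
        (!a == '(' && (!a == ']' && (!a == '[' && (!a == '}' && (!a == '{' &&
        (!a == '_' && (!a == '*' && !a == '`'))))))))))))))
      = (fun c : Char =>
          ! ['`', '*', '_', '{', '}', '[', ']', '(', ')', '#', '+', '-', '.', '!', '|'].contains c) := by
    funext c
    simp only [List.contains_cons, List.contains_nil, Bool.or_false, Bool.not_or]
    ac_rfl
  have hm : ((fun x : Char => if x = '\x0d' then ' ' else x) ∘ fun x => if x = '\n' then ' ' else x)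
      = (fun c : Char => if (decide (c = '\n') || decide (c = '\x0d')) = true then ' ' else c) := by
    funext c
    by_cases h1 : c = '\n' <;> by_cases h2 : c = '\x0d' <;>
      simp [Function.comp, h1, h2]
  rw [hf, hm]
  have hstrip : ∀ (l : List Char),
      PySem.Str.strip (String.ofList l) = String.ofList (PySem.Chars.strip l) := by
    intro l; simp [PySem.Str.strip]
  rw [hstrip]
  exact tail_step _
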